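-- pv_equiv track=rewrite | github.com/Baewd/skills-introduction-to-github | python_проэкты/лабиринт/def_my.py | my_index
-- ===== SOURCE A (Python) =====
-- def my_index(list):
--     a = 0
--     for i in list :
--         for ii in i :
--             if ii == "p" :
--                 return a
--             else :
--                 a+=1
-- ===== SOURCE B (Python) =====
-- def my_index(list):
--     flat = [ii for i in list for ii in i]
--     return flat.index("p") if "p" in flat else None
-- ===== Notes on version B (the rewrite author's own statement) =====
-- stated objective: idiomatic
-- what changed: Replaces the nested counting loops with early return by a flatten comprehension followed by a membership-guarded library .index lookup.
import Mathlib
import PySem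

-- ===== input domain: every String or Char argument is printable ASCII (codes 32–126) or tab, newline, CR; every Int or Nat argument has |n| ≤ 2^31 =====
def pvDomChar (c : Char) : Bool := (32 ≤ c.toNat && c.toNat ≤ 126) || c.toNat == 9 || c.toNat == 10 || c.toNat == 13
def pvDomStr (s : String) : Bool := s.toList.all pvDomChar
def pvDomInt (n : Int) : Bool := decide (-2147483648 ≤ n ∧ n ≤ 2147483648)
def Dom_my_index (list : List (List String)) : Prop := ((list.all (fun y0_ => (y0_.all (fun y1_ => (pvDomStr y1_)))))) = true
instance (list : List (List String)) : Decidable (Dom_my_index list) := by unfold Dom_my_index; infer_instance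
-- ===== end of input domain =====

-- B flattens the nested list once and looks up the first "p" with a guarded library search, instead of A's nested loops with a running counter; idiomatic rewrite, same cost.
-- ===== PORT A =====
-- inner loop 'for ii in i': either returns early (.inl result) or yields the updated counter (.inr a)
def my_index_inner (a : Int) : List String → Option Int ⊕ Int
  | [] => .inr a
  | ii :: rest => if ii = "p" then .inl (some a) else my_index_inner (a + 1) rest

-- outer loop 'for i in list'; falling off the end returns None
def my_index_outer (a : Int) : List (List String) → Option Int
  | [] => none
  | i :: rest =>
    match my_index_inner a i with
    | .inl r => r
    | .inr a' => my_index_outer a' rest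

def my_index (list : List (List String)) : Option Int :=
  my_index_outer 0 list

-- ===== PORT B =====
def my_index_alt (list : List (List String)) : Option Int :=
  let flat := list.flatMap (fun i => i)
  if "p" ∈ flat then (PySem.List.index? flat "p").map (fun n => (n : Int)) else none

-- ===== PRECONDITION & SPEC =====
def Spec_my_index (list : List (List String)) (out : Option Int) : Prop := out = my_index_alt list
instance (list : List (List String)) (out : Option Int) : Decidable (Spec_my_index list out) := by unfold Spec_my_index; infer_instance

-- ===== CLAIM (what is proved, stated in full; the proofs are below) =====
def Claim_equal_my_index : Prop := ∀ (list : List (List String)), Dom_my_index list → Spec_my_index list (my_index list)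

-- ===== LEMMAS AND PROOFS =====


-- ===== LEMMAS =====
theorem index?_append_of_not_mem (l t : List String) (v : String) (h : v ∉ l) :
    PySem.List.index? (l ++ t) v = (PySem.List.index? t v).map (fun n => n + l.length) := by
  induction l with
  | nil => simp [Option.map_id']
  | cons x xs ih =>
    have hx : x ≠ v := fun e => h (e ▸ List.mem_cons_self)
    rw [List.cons_append, PySem.List.index?_cons_of_ne _ hx,
      ih (fun hv => h (List.mem_cons_of_mem _ hv))]
    cases PySem.List.index? t v <;> simp <;> omega

theorem inner_char (a : Int) (i : List String) :
    my_index_inner a i =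
      match PySem.List.index? i "p" with
      | some n => .inl (some (a + n))
      | none => .inr (a + i.length) := by
  induction i generalizing a with
  | nil => simp [my_index_inner, PySem.List.index?]
  | cons x xs ih =>
    by_cases h : x = "p"
    · subst h
      rw [PySem.List.index?_cons_self]
      simp [my_index_inner]
    · rw [PySem.List.index?_cons_of_ne _ h]
      simp only [my_index_inner, if_neg h, ih]
      cases hx : PySem.List.index? xs "p" with
      | none => simp; push_cast; ring
      | some n => simp; push_cast; ring

theorem outer_char (a : Int) (l : List (List String)) :
    my_index_outer a l =
      match PySem.List.index? (l.flatMap (fun i => i)) "p" with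
      | some n => some (a + n)
      | none => none := by
  induction l generalizing a with
  | nil => simp [my_index_outer, PySem.List.index?]
  | cons i rest ih =>
    simp only [my_index_outer, inner_char, List.flatMap_cons]
    cases hi : PySem.List.index? i "p" with
    | some n =>
      have hm : "p" ∈ i := by
        rw [← PySem.List.index?_isSome_iff i "p", hi]; rfl
      rw [PySem.List.index?_append_of_mem _ hm, hi]
    | none =>
      have hnm : "p" ∉ i := (PySem.List.index?_eq_none_iff i "p").mp hi
      rw [index?_append_of_not_mem _ _ _ hnm]
      simp only [ih]
      cases PySem.List.index? (rest.flatMap (fun i => i)) "p" with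
      | none => simp
      | some n => simp; push_cast; ring

-- ===== VERDICT (by name: the statement is the Claim_ definition above) =====
theorem my_index_spec : Claim_equal_my_index := by
  intro l _
  unfold Spec_my_index my_index my_index_alt
  rw [outer_char]
  cases h : PySem.List.index? (l.flatMap (fun i => i)) "p" with
  | none =>
    have hnm : "p" ∉ l.flatMap (fun i => i) :=
      (PySem.List.index?_eq_none_iff _ _).mp h
    rw [if_neg hnm]
  | some n =>
    have hm : "p" ∈ l.flatMap (fun i => i) := by
      rw [← PySem.List.index?_isSome_iff _ "p", h]; rfl
    rw [if_pos hm, h]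
    simp
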